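-- pv_equiv track=rewrite | github.com/pypi-data/pypi-mirror-386 | packages/egregore/egregore-0.1.4a0.tar.gz/egregore-0.1.4a0/egregore/providers/core/base_retriever.py | _resolve_model_alias_universal
-- ===== SOURCE A (Python) =====
-- from typing import Dict, Any, Optional
--
-- def _resolve_model_alias_universal(model_prefix: str, available_models: Dict[str, Any]) -> str:
--     """Universal model resolution algorithm supporting multiple provider patterns."""
--     # Find all models matching the prefix
--     matching_models = []
--     for model_name in available_models.keys():
--         if model_name.startswith(model_prefix):
--             matching_models.append(model_name)
--
--     if not matching_models:
--         return model_prefix  # No matches, return as-is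
--
--     # If exact match exists, prefer it
--     if model_prefix in matching_models:
--         return model_prefix
--
--     # Universal resolution logic supporting different naming patterns:
--     # 1. OpenAI: gpt-4o-2024-05-13 (date-versioned)
--     # 2. Anthropic: claude-3-5-sonnet-20241022 (date-suffixed)
--     # 3. Google: gemini-1.5-pro-002, gemini-1.5-pro-latest (version + latest)
--
--     # Separate models with different suffixes
--     dated_models = []
--     version_models = []
--     latest_models = []
--
--     for model in matching_models:
--         suffix = model[len(model_prefix):].lstrip('-')
--         if suffix.startswith('202') and len(suffix) >= 8:  # Date pattern (2024, 20241022, etc.)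
--             dated_models.append(model)
--         elif suffix in ['latest', 'preview']:  # Latest/preview indicators
--             latest_models.append(model)
--         elif suffix.replace('.', '').replace('-', '').isdigit():  # Version numbers
--             version_models.append(model)
--         else:
--             # Fallback for other patterns
--             version_models.append(model)
--
--     # Priority: latest > newest date > highest version
--     if latest_models:
--         # Prefer 'latest' over 'preview'
--         if any('latest' in m for m in latest_models):
--             return next(m for m in latest_models if 'latest' in m)
--         return latest_models[0]
--
--     if dated_models:
--         # Sort by date (lexicographically works for YYYY-MM-DD and YYYYMMDD)
--         return sorted(dated_models)[-1]
--
--     if version_models: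
--         # Sort lexicographically (works for most version patterns)
--         return sorted(version_models)[-1]
--
--     # Fallback: return the last model lexicographically among matches
--     return sorted(matching_models)[-1]
-- ===== SOURCE B (Python) =====
-- def _resolve_model_alias_universal(model_prefix: str, available_models) -> str:
--     """Single-pass resolution: rank each matching model by a category score
--     (latest-containing=4, latest/preview=3, dated=2, other=1) and keep the best,
--     breaking ties by first-seen for latest buckets and lexicographic max otherwise."""
--     best = None  # (category, model_name)
--     for name in available_models:
--         if not name.startswith(model_prefix):
--             continue
--         if name == model_prefix:
--             return name  # exact match wins immediately
--         suffix = name[len(model_prefix):].lstrip('-')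
--         if suffix in ('latest', 'preview'):
--             cat = 4 if 'latest' in name else 3
--         elif suffix.startswith('202') and len(suffix) >= 8:
--             cat = 2
--         else:
--             cat = 1
--         if best is None or cat > best[0] or (cat == best[0] and cat <= 2 and name > best[1]):
--             best = (cat, name)
--     return best[1] if best is not None else model_prefix
-- ===== Notes on version B (the rewrite author's own statement) =====
-- stated objective: simpler
-- what changed: Replaces A's three bucket lists, per-bucket sorting and four-way cascade by a single pass that scores each matching model with a category rank (latest-substring=4, latest/preview=3, dated=2, other=1) and keeps one running best (first-seen for latest ranks, lexicographic max otherwise), with an early return on an exact match.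
import Mathlib
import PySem

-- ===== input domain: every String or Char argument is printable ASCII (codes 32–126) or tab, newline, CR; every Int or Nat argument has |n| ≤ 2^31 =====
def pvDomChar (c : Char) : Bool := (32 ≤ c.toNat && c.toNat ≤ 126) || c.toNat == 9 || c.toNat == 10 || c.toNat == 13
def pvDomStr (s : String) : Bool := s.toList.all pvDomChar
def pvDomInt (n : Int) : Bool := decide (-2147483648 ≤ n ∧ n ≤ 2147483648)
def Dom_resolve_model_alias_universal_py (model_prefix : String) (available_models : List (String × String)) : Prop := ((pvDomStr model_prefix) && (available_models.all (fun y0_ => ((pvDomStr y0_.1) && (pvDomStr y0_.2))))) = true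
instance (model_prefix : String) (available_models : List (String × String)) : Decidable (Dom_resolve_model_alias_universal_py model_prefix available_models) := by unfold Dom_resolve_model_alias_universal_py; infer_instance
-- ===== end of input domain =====

-- B replaces A's bucket lists + per-bucket sorting/cascade by a single best-kept fold
-- ranking each matching model with a category score; objective: simpler (one pass, no sorting).


-- ===== PORT A =====
-- shared transliterations of the suffix expressions both Pythons contain verbatim:
-- model[len(model_prefix):].lstrip('-')  (drop of a nonnegative index and a single-char
-- left strip are exact as drop/dropWhile on the code-point list)
def pvSuffix (model_prefix m : String) : List Char :=
  (m.toList.drop model_prefix.toList.length).dropWhile (fun c => c == '-')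
-- suffix.startswith('202') and len(suffix) >= 8
def pvTD (model_prefix m : String) : Bool :=
  PySem.Chars.startswith (pvSuffix model_prefix m) ['2', '0', '2'] &&
    decide (8 ≤ (pvSuffix model_prefix m).length)
-- suffix in ['latest', 'preview']  /  suffix in ('latest', 'preview')
def pvTL (model_prefix m : String) : Bool :=
  (pvSuffix model_prefix m == "latest".toList) || (pvSuffix model_prefix m == "preview".toList)
-- suffix.replace('.', '').replace('-', '').isdigit()   (only A tests this)
def pvDigit (model_prefix m : String) : Bool :=
  PySem.Chars.strIsdigit
    (PySem.Chars.replace (PySem.Chars.replace (pvSuffix model_prefix m) ['.'] []) ['-'] [])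

-- literal port of A (dict iteration = key order of the association list; the `.getD
-- model_prefix` defaults after sorted(..)[-1] / next(..) sit on branches guarded nonempty)
def resolve_model_alias_universal_py (model_prefix : String) (available_models : List (String × String)) : String :=
  let matching_models : List String :=
    available_models.foldl
      (fun acc kv => if PySem.Str.startswith kv.1 model_prefix then acc ++ [kv.1] else acc) []
  if matching_models = [] then model_prefix
  else if matching_models.contains model_prefix then model_prefix
  else
    let b :=
      matching_models.foldl
        (fun (b : List String × List String × List String) model =>
          if pvTD model_prefix model then (b.1 ++ [model], b.2.1, b.2.2)
          else if pvTL model_prefix model then (b.1, b.2.1, b.2.2 ++ [model])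
          else if pvDigit model_prefix model then (b.1, b.2.1 ++ [model], b.2.2)
          else (b.1, b.2.1 ++ [model], b.2.2))
        ([], [], [])
    let dated_models := b.1
    let version_models := b.2.1
    let latest_models := b.2.2
    if latest_models ≠ [] then
      if latest_models.any (fun m => PySem.Str.isIn "latest" m) then
        (latest_models.find? (fun m => PySem.Str.isIn "latest" m)).getD model_prefix
      else latest_models.headD model_prefix
    else if dated_models ≠ [] then
      (PySem.List.pyGet? (PySem.List.sorted dated_models (fun x => x) false) (-1)).getD model_prefix
    else if version_models ≠ [] then
      (PySem.List.pyGet? (PySem.List.sorted version_models (fun x => x) false) (-1)).getD model_prefix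
    else
      (PySem.List.pyGet? (PySem.List.sorted matching_models (fun x => x) false) (-1)).getD model_prefix

-- ===== PORT B =====
-- cat = 4 if 'latest' in name else 3 / 2 / 1, exactly as Source B classifies
def pvCatB (model_prefix name : String) : Nat :=
  if pvTL model_prefix name then (if PySem.Str.isIn "latest" name then 4 else 3)
  else if pvTD model_prefix name then 2
  else 1

-- Source B's single for-loop with its early return and running best = Option (cat, name)
def pvAltLoop (model_prefix : String) : List (String × String) → Option (Nat × String) → String
  | [], best =>
    match best with
    | some b => b.2
    | none => model_prefix
  | kv :: rest, best =>
    if PySem.Str.startswith kv.1 model_prefix then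
      if kv.1 = model_prefix then model_prefix
      else
        pvAltLoop model_prefix rest
          (match best with
           | none => some (pvCatB model_prefix kv.1, kv.1)
           | some (bc, bn) =>
             if bc < pvCatB model_prefix kv.1 ∨
                 (pvCatB model_prefix kv.1 = bc ∧ pvCatB model_prefix kv.1 ≤ 2 ∧ bn < kv.1) then
               some (pvCatB model_prefix kv.1, kv.1)
             else some (bc, bn))
    else pvAltLoop model_prefix rest best

def resolve_model_alias_universal_py_alt (model_prefix : String) (available_models : List (String × String)) : String :=
  pvAltLoop model_prefix available_models none

-- ===== PRECONDITION & SPEC =====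
def Spec_resolve_model_alias_universal_py (model_prefix : String) (available_models : List (String × String)) (out : String) : Prop := out = resolve_model_alias_universal_py_alt model_prefix available_models
instance (model_prefix : String) (available_models : List (String × String)) (out : String) : Decidable (Spec_resolve_model_alias_universal_py model_prefix available_models out) := by unfold Spec_resolve_model_alias_universal_py; infer_instance

-- ===== CLAIM (what is proved, stated in full; the proofs are below) =====
def Claim_equal_resolve_model_alias_universal_py : Prop := ∀ (model_prefix : String) (available_models : List (String × String)), Dom_resolve_model_alias_universal_py model_prefix available_models → Spec_resolve_model_alias_universal_py model_prefix available_models (resolve_model_alias_universal_py model_prefix available_models)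

-- ===== LEMMAS AND PROOFS =====

-- the list of matching model names, in iteration order
def pvMatch (p : String) (l : List (String × String)) : List String :=
  (l.filter (fun kv => PySem.Str.startswith kv.1 p)).map Prod.fst

-- Source B's step function on the running best
def pvBStep (p : String) (best : Option (Nat × String)) (m : String) : Option (Nat × String) :=
  match best with
  | none => some (pvCatB p m, m)
  | some (bc, bn) =>
    if bc < pvCatB p m ∨ (pvCatB p m = bc ∧ pvCatB p m ≤ 2 ∧ bn < m) then some (pvCatB p m, m)
    else some (bc, bn)

def pvCmax (p : String) (M : List String) : Nat := M.foldl (fun a m => max a (pvCatB p m)) 0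

def pvMaxStr : List String → String
  | [] => ""
  | x :: t => t.foldl max x

-- the winner Source B's fold keeps: first model of the top latest category, else the
-- lexicographically greatest model of the top category
def pvPick (p : String) (M : List String) : String :=
  if 3 ≤ pvCmax p M then (M.filter (fun m => pvCatB p m == pvCmax p M)).headD ""
  else pvMaxStr (M.filter (fun m => pvCatB p m == pvCmax p M))

-- A's bucket cascade, abstracted over the matching list
def pvPickA (p : String) (M : List String) : String :=
  let dated := M.filter (fun m => pvTD p m)
  let version := M.filter (fun m => !pvTD p m && !pvTL p m)
  let latest := M.filter (fun m => !pvTD p m && pvTL p m)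
  if latest ≠ [] then
    if latest.any (fun m => PySem.Str.isIn "latest" m) then
      (latest.find? (fun m => PySem.Str.isIn "latest" m)).getD p
    else latest.headD p
  else if dated ≠ [] then
    (PySem.List.pyGet? (PySem.List.sorted dated (fun x => x) false) (-1)).getD p
  else if version ≠ [] then
    (PySem.List.pyGet? (PySem.List.sorted version (fun x => x) false) (-1)).getD p
  else (PySem.List.pyGet? (PySem.List.sorted M (fun x => x) false) (-1)).getD p

lemma pvTD_of_pvTL {p m : String} (h : pvTL p m = true) : pvTD p m = false := by
  unfold pvTL at h
  unfold pvTD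
  rcases Bool.or_eq_true_iff.mp h with h' | h' <;>
    rw [beq_iff_eq.mp h'] <;> decide

lemma pvCatB_pos (p m : String) : 1 ≤ pvCatB p m := by
  unfold pvCatB; split_ifs <;> omega

lemma pvCatB_le (p m : String) : pvCatB p m ≤ 4 := by
  unfold pvCatB; split_ifs <;> omega

-- A's classification loop builds the three buckets as filters of the matching list
lemma pv_class_foldl (p : String) (M : List String) (d v lt : List String) :
    M.foldl
      (fun (b : List String × List String × List String) model =>
        if pvTD p model then (b.1 ++ [model], b.2.1, b.2.2)
        else if pvTL p model then (b.1, b.2.1, b.2.2 ++ [model])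
        else if pvDigit p model then (b.1, b.2.1 ++ [model], b.2.2)
        else (b.1, b.2.1 ++ [model], b.2.2))
      (d, v, lt) =
      (d ++ M.filter (fun m => pvTD p m),
       v ++ M.filter (fun m => !pvTD p m && !pvTL p m),
       lt ++ M.filter (fun m => !pvTD p m && pvTL p m)) := by
  induction M generalizing d v lt with
  | nil => simp
  | cons m M ih =>
    rw [List.foldl_cons]
    by_cases hd : pvTD p m
    · rw [if_pos hd, ih]; simp [List.filter_cons, hd]
    · rw [if_neg hd]
      by_cases hl : pvTL p m
      · rw [if_pos hl, ih]; simp [List.filter_cons, hd, hl]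
      · rw [if_neg hl]
        by_cases hg : pvDigit p m
        · rw [if_pos hg, ih]; simp [List.filter_cons, hd, hl]
        · rw [if_neg hg, ih]; simp [List.filter_cons, hd, hl]

-- A in normal form
lemma pvA_eq (p : String) (l : List (String × String)) :
    resolve_model_alias_universal_py p l =
      (if pvMatch p l = [] then p
       else if (pvMatch p l).contains p then p
       else pvPickA p (pvMatch p l)) := by
  unfold resolve_model_alias_universal_py pvMatch pvPickA
  simp only [PySem.List.foldl_append_if
      (p := fun kv : String × String => PySem.Str.startswith kv.1 p)
      (f := fun kv : String × String => kv.1),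
    pv_class_foldl, List.nil_append]

-- B returns the prefix as soon as an exact match exists
lemma pvB_exact (p : String) (l : List (String × String)) (best : Option (Nat × String))
    (h : p ∈ pvMatch p l) : pvAltLoop p l best = p := by
  induction l generalizing best with
  | nil => simp [pvMatch] at h
  | cons kv rest ih =>
    unfold pvMatch at h
    rw [List.filter_cons] at h
    by_cases hq : PySem.Str.startswith kv.1 p
    · simp only [hq, if_pos] at h
      rw [List.map_cons, List.mem_cons] at h
      unfold pvAltLoop
      rw [if_pos hq]
      by_cases he : kv.1 = p
      · rw [if_pos he]
      · rw [if_neg he]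
        exact ih _ (h.resolve_left (fun hh => he hh.symm))
    · simp only [hq, Bool.false_eq_true, if_neg, not_false_iff] at h
      unfold pvAltLoop
      rw [if_neg hq]
      exact ih _ h

-- without an exact match B's loop is a fold of pvBStep over the matching names
lemma pvB_noexact (p : String) (l : List (String × String)) (best : Option (Nat × String))
    (h : p ∉ pvMatch p l) :
    pvAltLoop p l best =
      (match (pvMatch p l).foldl (pvBStep p) best with
       | none => p
       | some b => b.2) := by
  induction l generalizing best with
  | nil => cases best <;> simp [pvMatch, pvAltLoop]
  | cons kv rest ih =>
    unfold pvMatch at h ⊢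
    rw [List.filter_cons] at h ⊢
    by_cases hq : PySem.Str.startswith kv.1 p
    · simp only [hq, if_pos] at h ⊢
      rw [List.map_cons, List.mem_cons] at h
      push_neg at h
      unfold pvAltLoop
      rw [if_pos hq, if_neg (fun he => h.1 he.symm), List.map_cons, List.foldl_cons]
      exact ih (pvBStep p best kv.1) h.2
    · simp only [hq, Bool.false_eq_true, if_neg, not_false_iff] at h ⊢
      unfold pvAltLoop
      rw [if_neg hq]
      exact ih _ h

lemma pvCmax_snoc (p : String) (M : List String) (m : String) :
    pvCmax p (M ++ [m]) = max (pvCmax p M) (pvCatB p m) := by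
  unfold pvCmax; rw [List.foldl_append]; rfl

lemma pvCmax_ub (p : String) (M : List String) : ∀ x ∈ M, pvCatB p x ≤ pvCmax p M :=
  (PySem.List.le_foldl_max_nat M (pvCatB p) 0).2

lemma pvCmax_mem (p : String) (M : List String) (h : M ≠ []) :
    ∃ x ∈ M, pvCatB p x = pvCmax p M := by
  have h2 : pvCmax p M = 0 ∨ pvCmax p M ∈ M.map (pvCatB p) := by
    have := PySem.List.foldl_max_mem (M.map (pvCatB p)) 0
    rwa [List.foldl_map] at this
  rcases h2 with h2 | h2
  · rcases List.exists_mem_of_ne_nil M h with ⟨x, hx⟩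
    have := pvCmax_ub p M x hx
    have := pvCatB_pos p x
    omega
  · rcases List.mem_map.mp h2 with ⟨x, hx, hx2⟩
    exact ⟨x, hx, hx2⟩

lemma pvMaxStr_ub (xs : List String) : ∀ x ∈ xs, x ≤ pvMaxStr xs := by
  cases xs with
  | nil => simp
  | cons x t =>
    intro y hy
    rcases List.mem_cons.mp hy with h | h
    · exact h ▸ (PySem.List.le_foldl_max t x).1
    · exact (PySem.List.le_foldl_max t x).2 y h

lemma pvMaxStr_mem (xs : List String) (h : xs ≠ []) : pvMaxStr xs ∈ xs := by
  cases xs with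
  | nil => exact absurd rfl h
  | cons x t =>
    show List.foldl max x t ∈ x :: t
    rcases PySem.List.foldl_max_mem t x with h2 | h2
    · rw [h2]; exact List.mem_cons_self
    · exact List.mem_cons_of_mem x h2

lemma pvMaxStr_snoc (xs : List String) (m : String) (h : xs ≠ []) :
    pvMaxStr (xs ++ [m]) = max (pvMaxStr xs) m := by
  cases xs with
  | nil => exact absurd rfl h
  | cons x t => simp [pvMaxStr, List.foldl_append]

lemma pvHeadD_append_left {α : Type} (xs ys : List α) (d : α) (h : xs ≠ []) :
    (xs ++ ys).headD d = xs.headD d := by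
  cases xs with
  | nil => exact absurd rfl h
  | cons x t => rfl

lemma pvBStep_none (p m : String) : pvBStep p none m = some (pvCatB p m, m) := rfl

lemma pvBStep_some (p : String) (bc : Nat) (bn m : String) :
    pvBStep p (some (bc, bn)) m =
      (if bc < pvCatB p m ∨ (pvCatB p m = bc ∧ pvCatB p m ≤ 2 ∧ bn < m) then
        some (pvCatB p m, m)
       else some (bc, bn)) := rfl

-- the characterization of Source B's fold: the best pair is (top category, pvPick)
lemma pv_fold_char (p : String) (M : List String) :
    M.foldl (pvBStep p) none =
      (if M = [] then none else some (pvCmax p M, pvPick p M)) := by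
  induction M using List.reverseRecOn with
  | nil => simp
  | append_singleton M m ih =>
    rw [List.foldl_append, ih, List.foldl_cons, List.foldl_nil]
    by_cases hM : M = []
    · subst hM
      have hc : pvCmax p [m] = pvCatB p m := by
        unfold pvCmax; simp
      have hpick : pvPick p [m] = m := by
        unfold pvPick
        rw [hc]
        split_ifs <;> simp [pvMaxStr]
      rw [if_pos rfl, pvBStep_none,
        if_neg (show ¬([] ++ [m] = ([] : List String)) by simp), List.nil_append, hc, hpick]
    · rw [if_neg hM,
        if_neg (show ¬(M ++ [m] = []) from fun hh => hM (List.append_eq_nil_iff.mp hh).1),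
        pvBStep_some]
      have hub := pvCmax_ub p M
      rcases pvCmax_mem p M hM with ⟨w, hwM, hwc⟩
      by_cases h1 : pvCmax p M < pvCatB p m
      · rw [if_pos (Or.inl h1)]
        have hc : pvCmax p (M ++ [m]) = pvCatB p m := by
          rw [pvCmax_snoc]; omega
        have hfilter : (M ++ [m]).filter (fun x => pvCatB p x == pvCmax p (M ++ [m])) = [m] := by
          rw [hc, List.filter_append]
          have : M.filter (fun x => pvCatB p x == pvCatB p m) = [] := by
            rw [List.filter_eq_nil_iff]
            intro x hx
            have := hub x hx
            simp only [beq_iff_eq]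
            omega
          rw [this, List.nil_append, List.filter_cons]
          simp
        have hpick : pvPick p (M ++ [m]) = m := by
          unfold pvPick
          rw [hfilter]
          split_ifs <;> simp [pvMaxStr]
        rw [hc, hpick]
      · -- cat m ≤ cmax M
        have hle : pvCatB p m ≤ pvCmax p M := by omega
        have hc : pvCmax p (M ++ [m]) = pvCmax p M := by
          rw [pvCmax_snoc]; omega
        have hfs : (M ++ [m]).filter (fun x => pvCatB p x == pvCmax p M) =
            M.filter (fun x => pvCatB p x == pvCmax p M) ++
              (if pvCatB p m = pvCmax p M then [m] else []) := by
          rw [List.filter_append]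
          by_cases h2 : pvCatB p m = pvCmax p M
          · simp [h2]
          · simp [h2]
        have hfne : M.filter (fun x => pvCatB p x == pvCmax p M) ≠ [] := by
          intro hnil
          rw [List.filter_eq_nil_iff] at hnil
          exact hnil w hwM (by simp [hwc])
        by_cases h2 : pvCatB p m = pvCmax p M ∧ pvCatB p m ≤ 2 ∧ pvPick p M < m
        · rw [if_pos (Or.inr h2)]
          have hpick : pvPick p (M ++ [m]) = m := by
            unfold pvPick
            rw [hc, hfs, if_pos h2.1]
            rw [if_neg (by omega)]
            rw [pvMaxStr_snoc _ _ hfne]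
            have : pvPick p M = pvMaxStr (M.filter (fun x => pvCatB p x == pvCmax p M)) := by
              unfold pvPick
              rw [if_neg (by omega)]
            rw [← this, max_eq_right (le_of_lt h2.2.2)]
          rw [hc, hpick, h2.1]
        · have hcond : ¬(pvCmax p M < pvCatB p m ∨
              (pvCatB p m = pvCmax p M ∧ pvCatB p m ≤ 2 ∧ pvPick p M < m)) := by
            rintro (hcl | hcl)
            · omega
            · exact h2 hcl
          rw [if_neg hcond]
          have hpick : pvPick p (M ++ [m]) = pvPick p M := by
            unfold pvPick
            rw [hc, hfs]
            by_cases h3 : 3 ≤ pvCmax p M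
            · rw [if_pos h3, if_pos h3]
              exact pvHeadD_append_left _ _ _ hfne
            · rw [if_neg h3, if_neg h3]
              split_ifs with h4
              · -- cat m = cmax ≤ 2 and ¬(pick < m), so m ≤ maxStr
                have hm : m ≤ pvMaxStr (M.filter (fun x => pvCatB p x == pvCmax p M)) := by
                  by_contra hlt
                  push_neg at hlt
                  exact h2 ⟨h4, by omega, by
                    unfold pvPick
                    rw [if_neg h3]
                    exact hlt⟩
                rw [pvMaxStr_snoc _ _ hfne, max_eq_left hm]
              · simp
          rw [hc, hpick]

-- sorted(xs)[-1] is the maximum of xs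
lemma pv_sortedLast (xs : List String) (h : xs ≠ []) (d : String) :
    (PySem.List.pyGet? (PySem.List.sorted xs (fun x => x) false) (-1)).getD d = pvMaxStr xs := by
  have hs : PySem.List.sorted xs (fun x => x) false ≠ [] := by
    rw [Ne, PySem.List.sorted_eq_nil_iff]; exact h
  rw [PySem.List.pyGet?_neg_one]
  rw [List.getLast?_eq_some_getLast hs, Option.getD_some]
  have hperm : (PySem.List.sorted xs (fun x => x) false).Perm xs := PySem.List.sorted_perm xs _ _
  have hpw : (PySem.List.sorted xs (fun x => x) false).Pairwise (fun a b => a ≤ b) :=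
    PySem.List.sorted_pairwise xs (fun x => x) ..
  -- getLast is ≥ every element of the sorted list
  have hub : ∀ x ∈ PySem.List.sorted xs (fun x => x) false,
      x ≤ (PySem.List.sorted xs (fun x => x) false).getLast hs := by
    intro x hx
    set s := PySem.List.sorted xs (fun x => x) false with hsdef
    rcases List.getElem_of_mem hx with ⟨i, hi, hxi⟩
    rw [List.getLast_eq_getElem]
    rcases Nat.lt_or_ge i (s.length - 1) with hlt | hge
    · exact hxi ▸ (List.pairwise_iff_getElem.mp hpw i (s.length - 1) hi (by omega) hlt)
    · have : i = s.length - 1 := by omega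
      subst this
      exact le_of_eq hxi.symm
  apply le_antisymm
  · exact pvMaxStr_ub xs _ (hperm.mem_iff.mp (List.getLast_mem hs))
  · exact hub _ ((hperm.mem_iff).mpr (pvMaxStr_mem xs h))

-- A's cascade picks the same winner as Source B's characterized fold
lemma pvPickA_eq (p : String) (M : List String) (h : M ≠ []) :
    pvPickA p M = pvPick p M := by
  unfold pvPickA
  by_cases hL : M.filter (fun m => !pvTD p m && pvTL p m) = []
  · have hTL : ∀ m ∈ M, pvTL p m = false := by
      intro m hm
      rw [List.filter_eq_nil_iff] at hL
      have := hL m hm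
      by_cases hl : pvTL p m
      · exact absurd (by simp [pvTD_of_pvTL hl, hl]) this
      · simpa using hl
    rw [if_neg (by simp [hL])]
    by_cases hD : M.filter (fun m => pvTD p m) = []
    · have hTD : ∀ m ∈ M, pvTD p m = false := by
        intro m hm
        rw [List.filter_eq_nil_iff] at hD
        simpa using hD m hm
      have hcat : ∀ m ∈ M, pvCatB p m = 1 := by
        intro m hm
        unfold pvCatB
        rw [hTL m hm, hTD m hm]
        simp
      have hV : M.filter (fun m => !pvTD p m && !pvTL p m) = M := by
        rw [List.filter_eq_self]
        intro m hm
        simp [hTD m hm, hTL m hm]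
      have hc : pvCmax p M = 1 := by
        rcases pvCmax_mem p M h with ⟨w, hw, hwc⟩
        rw [← hwc, hcat w hw]
      rw [if_neg (by simp [hD]), if_pos (by simp [hV, h]), hV]
      unfold pvPick
      rw [hc, if_neg (by omega)]
      have : M.filter (fun m => pvCatB p m == (1 : Nat)) = M := by
        rw [List.filter_eq_self]
        intro m hm
        simp [hcat m hm]
      rw [this]
      exact pv_sortedLast M h p
    · -- dated nonempty, latest empty: top category is 2
      have hcat2 : ∀ m ∈ M, pvCatB p m = if pvTD p m then 2 else 1 := by
        intro m hm
        unfold pvCatB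
        rw [hTL m hm]
        simp
      have hc : pvCmax p M = 2 := by
        rcases List.exists_mem_of_ne_nil _ hD with ⟨w, hw⟩
        rw [List.mem_filter] at hw
        apply le_antisymm
        · rcases pvCmax_mem p M h with ⟨x, hx, hxc⟩
          rw [← hxc, hcat2 x hx]
          split_ifs <;> omega
        · have := pvCmax_ub p M w hw.1
          rw [hcat2 w hw.1, if_pos hw.2] at this
          exact this
      have hfilt : M.filter (fun m => pvCatB p m == (2 : Nat)) =
          M.filter (fun m => pvTD p m) := by
        apply List.filter_congr
        intro m hm
        rw [hcat2 m hm]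
        split_ifs with hd <;> simp [hd]
      rw [if_pos (by simp [hD])]
      unfold pvPick
      rw [hc, if_neg (by omega), hfilt]
      exact pv_sortedLast _ hD p
  · -- latest nonempty
    have hLf : M.filter (fun m => !pvTD p m && pvTL p m) = M.filter (fun m => pvTL p m) := by
      apply List.filter_congr
      intro m hm
      by_cases hl : pvTL p m
      · simp [hl, pvTD_of_pvTL hl]
      · simp [hl]
    rw [if_pos (by simp [hL])]
    by_cases hAny : (M.filter (fun m => !pvTD p m && pvTL p m)).any
        (fun m => PySem.Str.isIn "latest" m)
    · -- some latest-containing model: top category is 4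
      rcases List.any_eq_true.mp hAny with ⟨w, hw, hwl⟩
      rw [hLf, List.mem_filter] at hw
      have hwc : pvCatB p w = 4 := by
        unfold pvCatB
        rw [hw.2, if_pos rfl, hwl, if_pos rfl]
      have hc : pvCmax p M = 4 := le_antisymm
        (by
          rcases pvCmax_mem p M h with ⟨x, hx, hxc⟩
          rw [← hxc]; exact pvCatB_le p x)
        (hwc ▸ pvCmax_ub p M w hw.1)
      have hfilt : M.filter (fun m => pvCatB p m == (4 : Nat)) =
          (M.filter (fun m => !pvTD p m && pvTL p m)).filter
            (fun m => PySem.Str.isIn "latest" m) := by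
        rw [hLf, List.filter_filter]
        apply List.filter_congr
        intro m hm
        by_cases hl : pvTL p m
        · cases hll : PySem.Str.isIn "latest" m
          · have hll' : PySem.Chars.isIn ['l', 'a', 't', 'e', 's', 't'] m.toList = false := by
              simpa using hll
            simp [pvCatB, hl, hll']
          · have hll' : PySem.Chars.isIn ['l', 'a', 't', 'e', 's', 't'] m.toList = true := by
              simpa using hll
            simp [pvCatB, hl, hll']
        · have h2le : pvCatB p m ≤ 2 := by
            unfold pvCatB
            rw [if_neg (by simp [hl])]
            split_ifs <;> omega
          have h4 : pvCatB p m ≠ 4 := by omega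
          simp [hl, h4]
      rw [if_pos hAny]
      unfold pvPick
      rw [hc, if_pos (by omega), hfilt, ← List.head?_filter]
      have hne : (M.filter (fun m => !pvTD p m && pvTL p m)).filter
          (fun m => PySem.Str.isIn "latest" m) ≠ [] := by
        rw [Ne, List.filter_eq_nil_iff]
        push_neg
        exact ⟨w, by rw [hLf, List.mem_filter]; exact ⟨hw.1, hw.2⟩, by simpa using hwl⟩
      cases hcc : (M.filter (fun m => !pvTD p m && pvTL p m)).filter
          (fun m => PySem.Str.isIn "latest" m) with
      | nil => exact absurd hcc hne
      | cons a t => simp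
    · -- latest models, none containing 'latest': top category is 3
      have hnl : ∀ m ∈ M, pvTL p m = true → PySem.Str.isIn "latest" m = false := by
        intro m hm hl
        by_contra hc
        rw [List.any_eq_true] at hAny
        push_neg at hAny
        exact absurd (by
          have := hAny m (by rw [hLf, List.mem_filter]; exact ⟨hm, hl⟩)
          simpa using this) (by simpa using hc)
      have hcat3 : ∀ m ∈ M, pvTL p m = true → pvCatB p m = 3 := by
        intro m hm hl
        unfold pvCatB
        rw [hl, if_pos rfl, hnl m hm hl]
        simp
      have hc : pvCmax p M = 3 := by
        rcases List.exists_mem_of_ne_nil _ hL with ⟨w, hw⟩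
        rw [hLf, List.mem_filter] at hw
        apply le_antisymm
        · rcases pvCmax_mem p M h with ⟨x, hx, hxc⟩
          rw [← hxc]
          by_cases hl : pvTL p x
          · rw [hcat3 x hx hl]
          · unfold pvCatB
            rw [if_neg (by simp [hl])]
            split_ifs <;> omega
        · exact (hcat3 w hw.1 hw.2) ▸ pvCmax_ub p M w hw.1
      have hfilt : M.filter (fun m => pvCatB p m == (3 : Nat)) =
          M.filter (fun m => !pvTD p m && pvTL p m) := by
        rw [hLf]
        apply List.filter_congr
        intro m hm
        by_cases hl : pvTL p m
        · simp [hcat3 m hm hl, hl]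
        · have h2le : pvCatB p m ≤ 2 := by
            unfold pvCatB
            rw [if_neg (by simp [hl])]
            split_ifs <;> omega
          have h3 : pvCatB p m ≠ 3 := by omega
          simp [hl, h3]
      rw [if_neg hAny]
      unfold pvPick
      rw [hc, if_pos (by omega), hfilt]
      cases hcc : M.filter (fun m => !pvTD p m && pvTL p m) with
      | nil => exact absurd hcc hL
      | cons a t => simp

-- ===== VERDICT (by name: the statement is the Claim_ definition above) =====
theorem resolve_model_alias_universal_py_spec : Claim_equal_resolve_model_alias_universal_py := by
  intro p l _
  unfold Spec_resolve_model_alias_universal_py resolve_model_alias_universal_py_alt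
  rw [pvA_eq]
  by_cases hc : p ∈ pvMatch p l
  · rw [pvB_exact p l none hc]
    rw [if_neg (by intro hh; rw [hh] at hc; simp at hc), if_pos (by simpa using hc)]
  · rw [pvB_noexact p l none hc]
    by_cases hm : pvMatch p l = []
    · rw [if_pos hm, hm]
      simp
    · rw [if_neg hm, if_neg (by simpa using hc), pv_fold_char, if_neg hm]
      exact pvPickA_eq p (pvMatch p l) hm
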